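-- pv_equiv track=rewrite | github.com/djahern-max/supercpe-backend-v2 | app/services/vision_service.py | _apply_business_rules
-- ===== SOURCE A (Python) =====
-- from typing import Dict, List, Optional
--
-- def _apply_business_rules(
--     detected_areas: List[str], course_title: str, combined_text: str
-- ) -> List[str]:
--     """Apply business rules to refine subject area detection"""
--
--     # If no areas detected, apply fallback logic
--     if not detected_areas:
--         # Check for common patterns
--         title_lower = course_title.lower() if course_title else ""
--
--         if any(word in title_lower for word in ["tax", "taxation"]):
--             detected_areas.append("Taxes")
--         elif any(
--             word in title_lower
--             for word in [
--                 "finance",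
--                 "financial",
--                 "money",
--                 "investment",
--                 "debt",
--                 "interest",
--             ]
--         ):
--             detected_areas.append("Finance")
--         elif any(word in title_lower for word in ["business", "management"]):
--             detected_areas.append("Business management and organization")
--         elif any(word in title_lower for word in ["economic", "economy"]):
--             detected_areas.append("Economics")
--         elif any(
--             word in title_lower for word in ["communication", "writing", "speaking"]
--         ):
--             detected_areas.append("Communications")
--         elif any(
--             word in title_lower for word in ["computer", "technology", "software"]
--         ):
--             detected_areas.append("Computer science")
--         elif any(word in title_lower for word in ["ethics", "ethical"]):
--             detected_areas.append("Administrative practices")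
--         else:
--             # Default fallback for accounting courses
--             detected_areas.append("Specialized knowledge and its application")
--
--     # Remove duplicates while preserving order
--     seen = set()
--     filtered_areas = []
--     for area in detected_areas:
--         if area not in seen:
--             seen.add(area)
--             filtered_areas.append(area)
--
--     return filtered_areas
-- ===== SOURCE B (Python) =====
-- # Flat keyword->(priority, category) index: test every keyword once, keep the
-- # minimum-priority hit (instead of an early-exit if/elif cascade), and dedup by
-- # keeping exactly the positions that are each element's first index.
-- _KW = {
--     "tax": (0, "Taxes"), "taxation": (0, "Taxes"),
--     "finance": (1, "Finance"), "financial": (1, "Finance"),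
--     "money": (1, "Finance"), "investment": (1, "Finance"),
--     "debt": (1, "Finance"), "interest": (1, "Finance"),
--     "business": (2, "Business management and organization"),
--     "management": (2, "Business management and organization"),
--     "economic": (3, "Economics"), "economy": (3, "Economics"),
--     "communication": (4, "Communications"), "writing": (4, "Communications"),
--     "speaking": (4, "Communications"),
--     "computer": (5, "Computer science"), "technology": (5, "Computer science"),
--     "software": (5, "Computer science"),
--     "ethics": (6, "Administrative practices"),
--     "ethical": (6, "Administrative practices"),
-- }
-- _DEFAULT = "Specialized knowledge and its application"
--
--
-- def _apply_business_rules(detected_areas, course_title, combined_text):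
--     if not detected_areas:
--         title_lower = course_title.lower() if course_title else ""
--         hits = [pc for w, pc in _KW.items() if w in title_lower]
--         best = min(hits, key=lambda pc: pc[0])[1] if hits else _DEFAULT
--         detected_areas.append(best)
--     return [a for i, a in enumerate(detected_areas)
--             if detected_areas.index(a) == i]
-- ===== Notes on version B (the rewrite author's own statement) =====
-- stated objective: alternative
-- what changed: Replaces the early-exit if/elif keyword cascade with a flat keyword->(priority, category) index that is scanned in full, collecting every matching keyword and taking the minimum-priority hit, and replaces the seen-set dedup loop with a first-index comprehension (keep position i iff list.index(a)==i).
import Mathlib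
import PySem

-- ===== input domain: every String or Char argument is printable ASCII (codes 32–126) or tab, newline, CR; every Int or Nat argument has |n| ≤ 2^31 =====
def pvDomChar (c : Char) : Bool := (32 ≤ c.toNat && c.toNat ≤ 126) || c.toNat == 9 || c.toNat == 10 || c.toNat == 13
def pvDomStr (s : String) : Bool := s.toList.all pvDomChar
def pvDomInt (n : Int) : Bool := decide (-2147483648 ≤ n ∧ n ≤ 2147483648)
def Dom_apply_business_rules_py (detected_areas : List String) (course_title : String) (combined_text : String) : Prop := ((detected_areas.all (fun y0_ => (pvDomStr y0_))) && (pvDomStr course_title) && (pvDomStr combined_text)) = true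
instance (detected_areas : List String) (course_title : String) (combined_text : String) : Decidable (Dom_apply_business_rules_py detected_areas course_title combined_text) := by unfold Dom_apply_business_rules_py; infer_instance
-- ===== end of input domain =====

-- B replaces A's early-exit if/elif cascade by a flat keyword index scanned in full with a
-- minimum-priority reduction over all matches, and A's seen-set dedup loop by a first-index
-- filter (alternative decomposition; return-value equivalence — both versions append to
-- detected_areas in the empty-input case alike).

-- ===== PORT A =====
-- 'word in title_lower' = PySem.Chars.isIn on the lowered character list
def apply_business_rules_py (detected_areas : List String) (course_title : String) (combined_text : String) : List String :=
  let detected_areas :=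
    if detected_areas = [] then
      let title_lower : List Char :=
        if course_title.toList = [] then [] else PySem.Chars.lower course_title.toList
      if (["tax", "taxation"] : List String).any (fun w => PySem.Chars.isIn w.toList title_lower) then
        detected_areas ++ ["Taxes"]
      else if (["finance", "financial", "money", "investment", "debt", "interest"] : List String).any (fun w => PySem.Chars.isIn w.toList title_lower) then
        detected_areas ++ ["Finance"]
      else if (["business", "management"] : List String).any (fun w => PySem.Chars.isIn w.toList title_lower) then
        detected_areas ++ ["Business management and organization"]
      else if (["economic", "economy"] : List String).any (fun w => PySem.Chars.isIn w.toList title_lower) then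
        detected_areas ++ ["Economics"]
      else if (["communication", "writing", "speaking"] : List String).any (fun w => PySem.Chars.isIn w.toList title_lower) then
        detected_areas ++ ["Communications"]
      else if (["computer", "technology", "software"] : List String).any (fun w => PySem.Chars.isIn w.toList title_lower) then
        detected_areas ++ ["Computer science"]
      else if (["ethics", "ethical"] : List String).any (fun w => PySem.Chars.isIn w.toList title_lower) then
        detected_areas ++ ["Administrative practices"]
      else
        detected_areas ++ ["Specialized knowledge and its application"]
    else detected_areas
  -- seen-set / filtered-list dedup loop
  (detected_areas.foldl
    (fun (st : PySem.Set String × List String) area =>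
      if PySem.Set.contains st.1 area then st
      else (PySem.Set.add st.1 area, st.2 ++ [area]))
    (PySem.Set.empty, ([] : List String))).2

-- ===== PORT B =====
-- the _KW dict, as its (key, value) item list (all keys distinct)
def pvKW : List (String × (Int × String)) :=
  [ ("tax", (0, "Taxes")), ("taxation", (0, "Taxes")),
    ("finance", (1, "Finance")), ("financial", (1, "Finance")),
    ("money", (1, "Finance")), ("investment", (1, "Finance")),
    ("debt", (1, "Finance")), ("interest", (1, "Finance")),
    ("business", (2, "Business management and organization")),
    ("management", (2, "Business management and organization")),
    ("economic", (3, "Economics")), ("economy", (3, "Economics")),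
    ("communication", (4, "Communications")), ("writing", (4, "Communications")),
    ("speaking", (4, "Communications")),
    ("computer", (5, "Computer science")), ("technology", (5, "Computer science")),
    ("software", (5, "Computer science")),
    ("ethics", (6, "Administrative practices")),
    ("ethical", (6, "Administrative practices")) ]

def pvDefault : String := "Specialized knowledge and its application"

def apply_business_rules_py_alt (detected_areas : List String) (course_title : String) (combined_text : String) : List String :=
  let detected_areas :=
    if detected_areas = [] then
      let title_lower : List Char :=
        if course_title.toList = [] then [] else PySem.Chars.lower course_title.toList
      -- hits = [pc for w, pc in _KW.items() if w in title_lower]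
      let hits : List (Int × String) :=
        (pvKW.filter (fun p => PySem.Chars.isIn p.1.toList title_lower)).map (fun p => p.2)
      -- best = min(hits, key=lambda pc: pc[0])[1] if hits else _DEFAULT
      let best : String :=
        match PySem.List.min? hits (fun pc => pc.1) with
        | some pc => pc.2
        | none => pvDefault
      detected_areas ++ [best]
    else detected_areas
  -- [a for i, a in enumerate(detected_areas) if detected_areas.index(a) == i]
  ((PySem.List.enumerate detected_areas 0).filter
      (fun p => (PySem.List.index? detected_areas p.2).map (fun n : Nat => (n : Int)) == some p.1)).map
    (fun p => p.2)

-- ===== PRECONDITION & SPEC =====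
def Spec_apply_business_rules_py (detected_areas : List String) (course_title : String) (combined_text : String) (out : List String) : Prop := out = apply_business_rules_py_alt detected_areas course_title combined_text
instance (detected_areas : List String) (course_title : String) (combined_text : String) (out : List String) : Decidable (Spec_apply_business_rules_py detected_areas course_title combined_text out) := by unfold Spec_apply_business_rules_py; infer_instance

-- ===== CLAIM (what is proved, stated in full; the proofs are below) =====
def Claim_equal_apply_business_rules_py : Prop := ∀ (detected_areas : List String) (course_title : String) (combined_text : String), Dom_apply_business_rules_py detected_areas course_title combined_text → Spec_apply_business_rules_py detected_areas course_title combined_text (apply_business_rules_py detected_areas course_title combined_text)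

-- ===== LEMMAS AND PROOFS =====

-- ---- classifier side ----

-- groups: (condition, priority, category); their hit segments
def pvSegs : List (Bool × Int × String) → List (Int × String)
  | [] => []
  | g :: r => (if g.1 then [(g.2.1, g.2.2)] else []) ++ pvSegs r

-- the first-true-condition cascade, as the optional best (priority, category)
def pvBest : List (Bool × Int × String) → Option (Int × String)
  | [] => none
  | g :: r => if g.1 then some (g.2.1, g.2.2) else pvBest r

-- B's hits list is pvSegs of the per-keyword group list
theorem pv_hits_eq (l : List (String × (Int × String))) (title : List Char) :
    ((l.filter (fun p => PySem.Chars.isIn p.1.toList title)).map (fun p => p.2)) =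
      pvSegs (l.map (fun p => (PySem.Chars.isIn p.1.toList title, p.2.1, p.2.2))) := by
  induction l with
  | nil => rfl
  | cons x xs ih =>
    by_cases h : PySem.Chars.isIn x.1.toList title = true
    · simp [pvSegs, h, ih]
    · simp [pvSegs, Bool.eq_false_iff.mpr h, ih]

theorem pv_segs_lb (p : Int) (gs : List (Bool × Int × String))
    (h : ∀ g ∈ gs, p ≤ g.2.1) : ∀ y ∈ pvSegs gs, p ≤ y.1 := by
  induction gs with
  | nil => intro y hy; simp [pvSegs] at hy
  | cons g r ih =>
    intro y hy
    simp only [pvSegs, List.mem_append] at hy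
    rcases hy with hy | hy
    · rcases Bool.eq_false_or_eq_true g.1 with hb | hb <;> simp [hb] at hy
      subst hy; exact h g (by simp)
    · exact ih (fun g' hg' => h g' (by simp [hg'])) y hy

-- min?'s fold step, named
def pvStep (acc : Option (Int × String)) (x : Int × String) : Option (Int × String) :=
  match acc with
  | none => some x
  | some m => if x.1 < m.1 then some x else some m

theorem pv_min_eq (xs : List (Int × String)) :
    PySem.List.min? xs (fun pc => pc.1) = xs.foldl pvStep none := by
  simp only [PySem.List.min?]
  congr 1
  funext acc x
  cases acc <;> rfl

-- the fold keeps an accumulator nothing beats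
theorem pv_foldl_keep (m0 : Int × String) (l : List (Int × String))
    (h : ∀ y ∈ l, m0.1 ≤ y.1) :
    l.foldl pvStep (some m0) = some m0 := by
  induction l with
  | nil => rfl
  | cons y r ih =>
    have hy : ¬ (y.1 < m0.1) := not_lt.mpr (h y (by simp))
    simp only [List.foldl_cons, pvStep, if_neg hy]
    exact ih (fun z hz => h z (by simp [hz]))

theorem pv_min_first (x : Int × String) (l : List (Int × String))
    (h : ∀ y ∈ l, x.1 ≤ y.1) :
    PySem.List.min? (x :: l) (fun pc => pc.1) = some x := by
  rw [pv_min_eq, List.foldl_cons]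
  exact pv_foldl_keep x l h

-- min over the hit segments of a priority-nondecreasing group list = the first-true cascade
theorem pv_min_best (gs : List (Bool × Int × String))
    (h : gs.Pairwise (fun a b => a.2.1 ≤ b.2.1)) :
    PySem.List.min? (pvSegs gs) (fun pc => pc.1) = pvBest gs := by
  induction gs with
  | nil => rfl
  | cons g r ih =>
    rcases List.pairwise_cons.mp h with ⟨hg, hr⟩
    by_cases hb : g.1 = true
    · have hs : pvSegs (g :: r) = (g.2.1, g.2.2) :: pvSegs r := by simp [pvSegs, hb]
      rw [hs, pv_min_first _ _ (by simpa using pv_segs_lb g.2.1 r hg)]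
      simp [pvBest, hb]
    · have hs : pvSegs (g :: r) = pvSegs r := by simp [pvSegs, hb]
      rw [hs, ih hr]
      simp [pvBest, hb]

-- an if/elif chain on two conditions with the same result merges to an 'or'
theorem pv_if_or {α : Type} (a b : Bool) (x y : α) :
    (if a then x else if b then x else y) = (if (a || b) then x else y) := by
  cases a <;> simp

-- ---- dedup side ----

-- A's seen-set/filtered-list loop computes foldl Set.add
theorem pv_foldl_pair_dedup (xs : List String) (s : List String) :
    (xs.foldl
      (fun (st : PySem.Set String × List String) area =>
        if PySem.Set.contains st.1 area then st
        else (PySem.Set.add st.1 area, st.2 ++ [area]))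
      (s, s)).2 = xs.foldl PySem.Set.add s := by
  induction xs generalizing s with
  | nil => rfl
  | cons x xs ih =>
    simp only [List.foldl_cons]
    by_cases h : PySem.Set.contains s x = true
    · rw [if_pos h, ih]
      congr 1
      have hm : x ∈ s := by simpa [PySem.Set.contains] using h
      simp [PySem.Set.add, hm]
    · rw [if_neg h]
      have hm : x ∉ s := by simpa [PySem.Set.contains] using h
      have hadd : PySem.Set.add s x = s ++ [x] := by
        simp [PySem.Set.add, hm]
      rw [hadd, ih]

-- the elements kept by "first occurrence in pre ++ xs", recursively
def pvFirstNew : List String → List String → List String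
  | _, [] => []
  | pre, x :: rest =>
      if x ∈ pre then pvFirstNew (pre ++ [x]) rest
      else x :: pvFirstNew (pre ++ [x]) rest

theorem pvFirstNew_congr (xs : List String) : ∀ (pre pre' : List String),
    (∀ a, a ∈ pre ↔ a ∈ pre') → pvFirstNew pre xs = pvFirstNew pre' xs := by
  induction xs with
  | nil => intro pre pre' _; rfl
  | cons x rest ih =>
    intro pre pre' h
    have h' : ∀ a, a ∈ pre ++ [x] ↔ a ∈ pre' ++ [x] := by
      intro a; simp [h a]
    by_cases hx : x ∈ pre
    · rw [pvFirstNew, pvFirstNew, if_pos hx, if_pos ((h x).mp hx), ih _ _ h']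
    · rw [pvFirstNew, pvFirstNew, if_neg hx, if_neg (fun hc => hx ((h x).mpr hc)), ih _ _ h']

theorem pv_addfold (xs : List String) : ∀ (s : List String),
    xs.foldl PySem.Set.add s = s ++ pvFirstNew s xs := by
  induction xs with
  | nil => intro s; simp [pvFirstNew]
  | cons x rest ih =>
    intro s
    by_cases hx : x ∈ s
    · have hadd : PySem.Set.add s x = s := by simp [PySem.Set.add, PySem.Set.contains, hx]
      have hc : pvFirstNew (s ++ [x]) rest = pvFirstNew s rest :=
        pvFirstNew_congr rest (s ++ [x]) s (by intro a; simp; intro ha; subst ha; exact hx)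
      rw [List.foldl_cons, hadd, ih s, pvFirstNew, if_pos hx, hc]
    · have hadd : PySem.Set.add s x = s ++ [x] := by
        simp [PySem.Set.add, PySem.Set.contains, hx]
      rw [List.foldl_cons, hadd, ih (s ++ [x]), pvFirstNew, if_neg hx]
      simp

-- B's first-index filter keeps exactly the first occurrences
theorem pv_enum_filter (xs : List String) : ∀ (pre : List String),
    ((PySem.List.enumerate xs ((pre.length : Nat) : Int)).filter
        (fun p => (PySem.List.index? (pre ++ xs) p.2).map (fun n : Nat => (n : Int)) == some p.1)).map
      (fun p => p.2) = pvFirstNew pre xs := by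
  induction xs with
  | nil => intro pre; simp [PySem.List.enumerate_nil, pvFirstNew]
  | cons x rest ih =>
    intro pre
    rw [PySem.List.enumerate_cons]
    have hsplit : pre ++ x :: rest = (pre ++ [x]) ++ rest := by simp
    by_cases hx : x ∈ pre
    · -- head dropped: x's first index is inside pre, < pre.length
      obtain ⟨k, hk⟩ : ∃ k, PySem.List.index? pre x = some k :=
        Option.isSome_iff_exists.mp ((PySem.List.index?_isSome_iff pre x).mpr hx)
      have hklt : k < pre.length := by
        rcases (PySem.List.index?_eq_some_iff _ _ _).mp hk with ⟨p, s, hpre, hlen, -⟩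
        subst hpre
        simp only [List.length_append, List.length_cons]
        omega
      have hidx : PySem.List.index? (pre ++ x :: rest) x = some k := by
        rw [PySem.List.index?_append_of_mem _ hx, hk]
      have hcond : ((PySem.List.index? (pre ++ x :: rest) x).map (fun n : Nat => (n : Int)) ==
          some ((pre.length : Nat) : Int)) = false := by
        rw [hidx]; simp; omega
      rw [List.filter_cons]
      simp only [hcond, Bool.false_eq_true, if_false]
      rw [pvFirstNew, if_pos hx]
      have h1 : ((pre.length : Nat) : Int) + 1 = (((pre ++ [x]).length : Nat) : Int) := by
        simp
      rw [hsplit, h1, ih (pre ++ [x])]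
    · -- head kept: x first appears at index pre.length
      have hidx : PySem.List.index? (pre ++ x :: rest) x = some pre.length := by
        rw [hsplit, PySem.List.index?_append_of_mem _ (by simp),
          PySem.List.index?_append_singleton_self pre x hx]
      have hcond : ((PySem.List.index? (pre ++ x :: rest) x).map (fun n : Nat => (n : Int)) ==
          some ((pre.length : Nat) : Int)) = true := by
        rw [hidx]; simp
      rw [List.filter_cons]
      simp only [hcond, if_true]
      rw [List.map_cons, pvFirstNew, if_neg hx]
      have h1 : ((pre.length : Nat) : Int) + 1 = (((pre ++ [x]).length : Nat) : Int) := by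
        simp
      rw [hsplit, h1, ih (pre ++ [x])]

-- both dedups compute pvFirstNew [] ·
theorem pv_A_dedup (xs : List String) :
    (xs.foldl
      (fun (st : PySem.Set String × List String) area =>
        if PySem.Set.contains st.1 area then st
        else (PySem.Set.add st.1 area, st.2 ++ [area]))
      (PySem.Set.empty, ([] : List String))).2 = pvFirstNew [] xs := by
  have h1 := pv_foldl_pair_dedup xs []
  have h2 := pv_addfold xs []
  simp only [List.nil_append] at h2
  exact h1.trans h2

theorem pv_B_dedup (xs : List String) :
    ((PySem.List.enumerate xs 0).filter
        (fun p => (PySem.List.index? xs p.2).map (fun n : Nat => (n : Int)) == some p.1)).map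
      (fun p => p.2) = pvFirstNew [] xs := by
  have := pv_enum_filter xs []
  simpa using this

theorem pv_kw_pairwise (title : List Char) :
    (pvKW.map (fun p => (PySem.Chars.isIn p.1.toList title, p.2.1, p.2.2))).Pairwise
      (fun a b => a.2.1 ≤ b.2.1) := by
  simp only [pvKW, List.map_cons, List.map_nil, List.pairwise_cons, List.mem_cons]
  norm_num

-- ===== VERDICT (by name: the statement is the Claim_ definition above) =====
theorem apply_business_rules_py_spec : Claim_equal_apply_business_rules_py := by
  intro das ct cb _
  unfold Spec_apply_business_rules_py apply_business_rules_py apply_business_rules_py_alt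
  by_cases h : das = []
  · subst h
    rw [if_pos rfl, if_pos rfl]
    dsimp only
    rw [pv_hits_eq, pv_min_best _ (pv_kw_pairwise _)]
    simp only [pvKW, List.map_cons, List.map_nil, pvBest, List.any_cons, List.any_nil,
      Bool.or_false, pv_if_or, List.nil_append]
    split_ifs <;> (dsimp only [pvDefault]; rw [pv_A_dedup, pv_B_dedup])
  · rw [if_neg h, if_neg h]
    dsimp only
    rw [pv_A_dedup, pv_B_dedup]
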